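-- pv_equiv track=rewrite | github.com/MrBrantCode/unitest_baseline | mut_generate/mist_train_cf/cf_68103/solution.py | longest_prime_subarray
-- ===== SOURCE A (Python) =====
-- def is_prime(n):
--     """Helper function to check if a number is prime."""
--     if n <= 1:
--         return False
--     if n <= 3:
--         return True
--     if n % 2 == 0 or n % 3 == 0:
--         return False
--     i = 5
--     while i * i <= n:
--         if n % i == 0 or n % (i + 2) == 0:
--             return False
--         i += 6
--     return True
--
-- def longest_prime_subarray(arr):
--     """Find the longest continuous subarray of prime numbers."""
--     start = 0
--     end = 0
--     max_length = 0
--     max_start = 0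
--     max_end = 0
--
--     for i in range(len(arr)):
--         if is_prime(arr[i]):
--             end = i
--             if end - start + 1 > max_length:
--                 max_length = end - start + 1
--                 max_start = start
--                 max_end = end
--         else:
--             start = i + 1
--
--     return max_start, max_end
-- ===== SOURCE B (Python) =====
-- def is_prime(n):
--     """Helper function to check if a number is prime."""
--     if n <= 1:
--         return False
--     if n <= 3:
--         return True
--     if n % 2 == 0 or n % 3 == 0:
--         return False
--     i = 5
--     while i * i <= n:
--         if n % i == 0 or n % (i + 2) == 0:
--             return False
--         i += 6
--     return True
--
-- def _prime_run_len(arr, i):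
--     """Length of the maximal run of primes starting at index i."""
--     j = i
--     while j < len(arr) and is_prime(arr[j]):
--         j += 1
--     return j - i
--
-- def longest_prime_subarray(arr):
--     """Find the longest continuous subarray of prime numbers."""
--     best_len = best_start = best_end = 0
--     i = 0
--     while i < len(arr):
--         r = _prime_run_len(arr, i)
--         if r == 0:
--             i += 1
--         else:
--             if r > best_len:
--                 best_len, best_start, best_end = r, i, i + r - 1
--             i += r
--     return best_start, best_end
-- ===== Notes on version B (the rewrite author's own statement) =====
-- stated objective: alternative
-- what changed: Instead of A's per-index pass that tracks a sliding run start and re-checks the best at every prime element, B segments the array into maximal prime runs (a helper measures each run's length in one scan), updates the best record once per run, and jumps the index past the whole run.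
import Mathlib
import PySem

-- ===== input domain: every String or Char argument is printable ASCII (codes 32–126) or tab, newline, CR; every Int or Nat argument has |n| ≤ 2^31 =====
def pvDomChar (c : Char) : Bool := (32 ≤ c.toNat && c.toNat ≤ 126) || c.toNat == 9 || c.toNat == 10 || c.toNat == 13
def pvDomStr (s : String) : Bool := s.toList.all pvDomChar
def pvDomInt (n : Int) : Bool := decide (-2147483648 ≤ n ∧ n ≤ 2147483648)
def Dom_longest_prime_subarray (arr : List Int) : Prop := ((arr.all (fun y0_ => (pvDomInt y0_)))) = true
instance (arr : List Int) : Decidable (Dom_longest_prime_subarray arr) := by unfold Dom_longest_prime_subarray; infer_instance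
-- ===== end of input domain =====

-- ===== PORT A =====
-- B changes: A's per-index scan with a sliding run start is replaced by segmentation into
-- maximal prime runs, updating the best record once per run (objective: alternative).
-- is_prime is the shared helper of both Python versions (identical in Source A and Source B).
def primeLoop (n i : Int) : Bool :=
  if _h : i * i ≤ n then
    if PySem.Int.mod n i == 0 || PySem.Int.mod n (i + 2) == 0 then false
    else primeLoop n (i + 6)
  else true
termination_by (n + 1 - i).toNat
decreasing_by
  have hin : i ≤ n := by nlinarith [sq_nonneg (i - 1)]
  omega

def is_prime (n : Int) : Bool :=
  if n ≤ 1 then false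
  else if n ≤ 3 then true
  else if PySem.Int.mod n 2 == 0 || PySem.Int.mod n 3 == 0 then false
  else primeLoop n 5

-- one iteration of A's for-loop; state = (start, end, max_length, max_start, max_end)
def stepA (st : Int × Int × Int × Int × Int) (p : Int × Int) : Int × Int × Int × Int × Int :=
  match st with
  | (start, end_, maxLength, maxStart, maxEnd) =>
    if is_prime p.2 then
      let e := p.1
      if e - start + 1 > maxLength then (start, e, e - start + 1, start, e)
      else (start, e, maxLength, maxStart, maxEnd)
    else (p.1 + 1, end_, maxLength, maxStart, maxEnd)

def longest_prime_subarray (arr : List Int) : Int × Int :=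
  let st := (PySem.List.enumerate arr 0).foldl stepA (0, 0, 0, 0, 0)
  (st.2.2.2.1, st.2.2.2.2)

-- ===== PORT B =====
-- _prime_run_len(arr, i) of Source B, scanning the suffix of the array that starts at i
def runLen : List Int → Int
  | [] => 0
  | x :: xs => if is_prime x then 1 + runLen xs else 0

-- Source B's outer while-loop; best = (best_len, best_start, best_end)
def altGo : List Int → Int → Int × Int × Int → Int × Int × Int
  | [], _, best => best
  | x :: xs, i, best =>
    let r := runLen (x :: xs)
    if r == 0 then altGo xs (i + 1) best
    else
      let best' := if r > best.1 then (r, i, i + r - 1) else best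
      altGo (xs.drop (r - 1).toNat) (i + r) best'
termination_by l _ _ => l.length
decreasing_by
  all_goals simp

def longest_prime_subarray_alt (arr : List Int) : Int × Int :=
  let best := altGo arr 0 (0, 0, 0)
  (best.2.1, best.2.2)

-- ===== PRECONDITION & SPEC =====
def Spec_longest_prime_subarray (arr : List Int) (out : Int × Int) : Prop := out = longest_prime_subarray_alt arr
instance (arr : List Int) (out : Int × Int) : Decidable (Spec_longest_prime_subarray arr out) := by unfold Spec_longest_prime_subarray; infer_instance

-- ===== CLAIM (what is proved, stated in full; the proofs are below) =====
def Claim_equal_longest_prime_subarray : Prop := ∀ (arr : List Int), Dom_longest_prime_subarray arr → Spec_longest_prime_subarray arr (longest_prime_subarray arr)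

-- ===== LEMMAS AND PROOFS =====
-- remainder of the list after its leading run of primes
def restRun : List Int → List Int
  | [] => []
  | x :: xs => if is_prime x then restRun xs else x :: xs

lemma runLen_nonneg (l : List Int) : 0 ≤ runLen l := by
  induction l with
  | nil => simp [runLen]
  | cons x xs ih => simp only [runLen]; split <;> omega

lemma restRun_length_le (l : List Int) : (restRun l).length ≤ l.length := by
  induction l with
  | nil => simp [restRun]
  | cons x xs ih =>
    simp only [restRun]
    split
    · simp; omega
    · simp

lemma drop_runLen (xs : List Int) : xs.drop (runLen xs).toNat = restRun xs := by
  induction xs with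
  | nil => simp [runLen, restRun]
  | cons x xs ih =>
    by_cases hx : is_prime x = true
    · have h0 := runLen_nonneg xs
      simp only [runLen, restRun, hx, if_pos]
      have : (1 + runLen xs).toNat = (runLen xs).toNat + 1 := by omega
      rw [this]
      simpa using ih
    · simp [runLen, restRun, hx]

lemma restRun_head_not_prime (xs : List Int) : ∀ (y : Int) (ys : List Int),
    restRun xs = y :: ys → is_prime y = false := by
  induction xs with
  | nil => intro y ys h; simp [restRun] at h
  | cons x xs ih =>
    intro y ys h
    by_cases hx : is_prime x = true
    · exact ih y ys (by simpa [restRun, hx] using h)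
    · have hx' : is_prime x = false := by simpa using hx
      simp only [restRun, hx', Bool.false_eq_true, if_false, List.cons.injEq] at h
      rw [← h.1]; exact hx'

-- A's fold consumes the leading prime run of l in one jump: the best record is
-- updated (once, net) iff the full run beats it, provided bl already covers i - s.
lemma foldA_run (l : List Int) : ∀ (i s e bl bs be : Int), s ≤ i → i - s ≤ bl →
    List.foldl stepA (s, e, bl, bs, be) (PySem.List.enumerate l i) =
    List.foldl stepA
      (s,
       (if runLen l = 0 then e else i + runLen l - 1),
       (if i + runLen l - s > bl then i + runLen l - s else bl),
       (if i + runLen l - s > bl then s else bs),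
       (if i + runLen l - s > bl then i + runLen l - 1 else be))
      (PySem.List.enumerate (restRun l) (i + runLen l)) := by
  induction l with
  | nil =>
    intro i s e bl bs be hsi hbl
    simp only [runLen, restRun]
    have h1 : ¬ (i + (0:Int) - s > bl) := by omega
    rw [if_pos trivial, if_neg h1, if_neg h1, if_neg h1]
    simp
  | cons x xs ih =>
    intro i s e bl bs be hsi hbl
    by_cases hx : is_prime x = true
    · have h0 := runLen_nonneg xs
      rw [PySem.List.enumerate_cons]
      simp only [List.foldl_cons, stepA, hx, if_pos]
      simp only [runLen, restRun, hx, if_pos]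
      by_cases hup : i - s + 1 > bl
      · rw [if_pos hup]
        rw [ih (i + 1) s i (i - s + 1) s i (by omega) (by omega)]
        have e1 : i + 1 + runLen xs = i + (1 + runLen xs) := by ring
        rw [e1]
        congr 1
        split_ifs <;> (try simp only [Prod.mk.injEq]) <;> (try simp_all) <;> (try omega)
      · rw [if_neg hup]
        rw [ih (i + 1) s i bl bs be (by omega) (by omega)]
        have e1 : i + 1 + runLen xs = i + (1 + runLen xs) := by ring
        rw [e1]
        congr 1
        split_ifs <;> (try simp only [Prod.mk.injEq]) <;> (try simp_all) <;> (try omega)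
    · have hx' : is_prime x = false := by simpa using hx
      simp only [runLen, restRun, hx', Bool.false_eq_true, if_false]
      have h1 : ¬ (i + (0:Int) - s > bl) := by omega
      rw [if_pos trivial, if_neg h1, if_neg h1, if_neg h1]
      simp

-- main invariant: at a run boundary (start = current index), A's folded best
-- triple equals B's run recursion.
lemma main_go : ∀ (n : Nat) (l : List Int), l.length ≤ n → ∀ (i bl bs be e : Int), 0 ≤ bl →
    (let st := List.foldl stepA (i, e, bl, bs, be) (PySem.List.enumerate l i)
     (st.2.2.1, st.2.2.2.1, st.2.2.2.2)) = altGo l i (bl, bs, be) := by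
  intro n
  induction n with
  | zero =>
    intro l hl
    have : l = [] := by cases l <;> simp_all
    subst this
    intro i bl bs be e _
    simp [altGo]
  | succ n ih =>
    intro l hl i bl bs be e hbl
    match l with
    | [] => simp [altGo]
    | x :: xs =>
      by_cases hx : is_prime x = true
      · -- prime head: the whole run is consumed by both sides
        have hr : runLen (x :: xs) = 1 + runLen xs := by simp [runLen, hx]
        have h0 := runLen_nonneg xs
        have hrz : (1 + runLen xs == 0) = false := by simp; omega
        rw [altGo]
        simp only [hr, hrz, Bool.false_eq_true, if_false]
        have hdrop : xs.drop (1 + runLen xs - 1).toNat = restRun xs := by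
          have h2 : 1 + runLen xs - 1 = runLen xs := by ring
          rw [h2, drop_runLen]
        rw [hdrop]
        have hrun := foldA_run (x :: xs) i i e bl bs be (le_refl i) (by omega)
        rw [hr] at hrun
        have hz : ¬ (1 + runLen xs = 0) := by omega
        rw [if_neg hz] at hrun
        have harith : i + (1 + runLen xs) - i = 1 + runLen xs := by ring
        rw [harith] at hrun
        have hrest : restRun (x :: xs) = restRun xs := by simp [restRun, hx]
        rw [hrest] at hrun
        simp only [hrun]
        match hrr : restRun xs with
        | [] =>
          simp only [PySem.List.enumerate_nil, List.foldl_nil]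
          rw [altGo]
          split_ifs with hb <;> rfl
        | y :: ys =>
          have hy : is_prime y = false := restRun_head_not_prime xs y ys hrr
          rw [PySem.List.enumerate_cons]
          simp only [List.foldl_cons, stepA, hy, Bool.false_eq_true, if_false]
          rw [altGo]
          have hry : (runLen (y :: ys) == 0) = true := by simp [runLen, hy]
          simp only [hry, if_pos]
          have hlen : ys.length ≤ n := by
            have h1 : (restRun xs).length ≤ xs.length := restRun_length_le xs
            rw [hrr] at h1
            simp at h1 hl
            omega
          by_cases hb : 1 + runLen xs > bl
          · simp only [if_pos hb]
            have hIH := ih ys hlen (i + (1 + runLen xs) + 1) (1 + runLen xs) i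
              (i + (1 + runLen xs) - 1) (i + (1 + runLen xs) - 1) (by omega)
            simp only at hIH
            exact hIH
          · simp only [if_neg hb]
            have hIH := ih ys hlen (i + (1 + runLen xs) + 1) bl bs be
              (i + (1 + runLen xs) - 1) (by omega)
            simp only at hIH
            exact hIH
      · -- non-prime head: both sides advance one position
        have hx' : is_prime x = false := by simpa using hx
        rw [PySem.List.enumerate_cons]
        simp only [List.foldl_cons, stepA, hx', Bool.false_eq_true, if_false]
        rw [altGo]
        have hr : (runLen (x :: xs) == 0) = true := by simp [runLen, hx']
        simp only [hr, if_pos]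
        have hlen : xs.length ≤ n := by simp at hl; omega
        exact ih xs hlen (i + 1) bl bs be e hbl

-- ===== VERDICT (by name: the statement is the Claim_ definition above) =====
theorem longest_prime_subarray_spec : Claim_equal_longest_prime_subarray := by
  intro arr _
  unfold Spec_longest_prime_subarray longest_prime_subarray longest_prime_subarray_alt
  have h := main_go arr.length arr (le_refl _) 0 0 0 0 0 (le_refl 0)
  simp only at h
  have h1 := congrArg (fun t : Int × Int × Int => t.2.1) h
  have h2 := congrArg (fun t : Int × Int × Int => t.2.2) h
  simp only at h1 h2
  simp only [h1, h2]
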